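-- pv_equiv track=rewrite | github.com/lol903314/project | function.py | parse_option_ids
-- ===== SOURCE A (Python) =====
-- from typing import Any
--
-- def parse_int(value: Any, field_name: str, min_value: int | None = None, max_value: int | None = None) -> int:
--     try:
--         number = int(value)
--     except (TypeError, ValueError):
--         raise ValueError(f"{field_name} 必須是整數")
--     if min_value is not None and number < min_value:
--         raise ValueError(f"{field_name} 不可小於 {min_value}")
--     if max_value is not None and number > max_value:
--         raise ValueError(f"{field_name} 不可大於 {max_value}")
--     return number
--
-- def parse_option_ids(value: Any) -> list[int]:
--     if value is None:
--         return []
--     if not isinstance(value, list):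
--         raise ValueError("option_ids 必須是陣列")
--     option_ids = [parse_int(item, "option_id", 1) for item in value]
--     if len(option_ids) != len(set(option_ids)):
--         raise ValueError("option_ids 不可重複")
--     return option_ids
-- ===== SOURCE B (Python) =====
-- def parse_option_ids(value):
--     if value is None:
--         return []
--     if not isinstance(value, list):
--         raise ValueError("option_ids 必須是陣列")
--     option_ids = []
--     for item in value:
--         try:
--             number = int(item)
--         except (TypeError, ValueError):
--             raise ValueError("option_id 必須是整數")
--         if number < 1:
--             raise ValueError("option_id 不可小於 1")
--         option_ids.append(number)
--     ordered = sorted(option_ids)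
--     for i in range(1, len(ordered)):
--         if ordered[i] == ordered[i - 1]:
--             raise ValueError("option_ids 不可重複")
--     return option_ids
-- ===== Notes on version B (the rewrite author's own statement) =====
-- stated objective: alternative
-- what changed: The helper-based comprehension plus set-cardinality duplicate test is replaced by an inlined parsing loop followed by a sort-then-adjacent-scan duplicate check.
import Mathlib
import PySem

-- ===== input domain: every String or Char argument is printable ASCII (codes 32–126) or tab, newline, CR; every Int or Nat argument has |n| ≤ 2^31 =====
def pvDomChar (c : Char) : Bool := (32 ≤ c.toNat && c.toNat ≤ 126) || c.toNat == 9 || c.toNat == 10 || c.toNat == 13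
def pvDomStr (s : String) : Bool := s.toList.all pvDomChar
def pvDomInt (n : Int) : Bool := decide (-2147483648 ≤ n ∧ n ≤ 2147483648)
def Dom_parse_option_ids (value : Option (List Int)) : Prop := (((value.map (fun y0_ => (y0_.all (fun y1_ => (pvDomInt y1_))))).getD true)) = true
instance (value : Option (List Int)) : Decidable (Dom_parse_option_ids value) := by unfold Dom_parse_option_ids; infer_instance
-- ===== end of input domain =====

-- B replaces the parse_int-helper comprehension and the set-cardinality duplicate test by an
-- inlined parsing loop followed by a sort-then-adjacent-scan duplicate check (alternative, same result).

-- ===== PORT A =====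
-- parse_int(item, "option_id", 1): int() of an int is the int itself; the 'number < 1' branch
-- raises ValueError — those inputs are excluded by Pre_, as are both other raise sites.
def parse_option_ids (value : Option (List Int)) : List Int :=
  match value with
  | none => []
  | some xs =>
    let option_ids := xs.map (fun item => item)
    if PySem.List.len option_ids ≠ PySem.Set.len (PySem.Set.ofList option_ids) then []  -- raise: excluded by Pre_
    else option_ids

-- ===== PORT B =====
def parse_option_ids_alt (value : Option (List Int)) : List Int :=
  match value with
  | none => []
  | some xs =>
    let option_ids := xs.foldl (fun acc item => acc ++ [item]) []
    let ordered := PySem.List.sorted option_ids (fun x => x) false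
    if (PySem.List.pyRange 1 (PySem.List.len ordered) 1).any
        (fun i => PySem.List.pyGetD ordered i 0 == PySem.List.pyGetD ordered (i - 1) 0)
    then []  -- raise: excluded by Pre_
    else option_ids

-- ===== PRECONDITION & SPEC =====
-- Pre_ admits exactly the inputs on which the Python A returns normally: None, or a list of
-- integers all ≥ 1 with no duplicates (elsewhere A raises ValueError, and so does B).
def Pre_parse_option_ids (value : Option (List Int)) : Prop :=
  (value.getD []).Nodup ∧ ∀ x ∈ value.getD [], 1 ≤ x
instance (value : Option (List Int)) : Decidable (Pre_parse_option_ids value) := by unfold Pre_parse_option_ids; infer_instance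

def pvWitness_parse_option_ids : Option (List Int) := some [2, 5, 1]

def Spec_parse_option_ids (value : Option (List Int)) (out : List Int) : Prop := out = parse_option_ids_alt value
instance (value : Option (List Int)) (out : List Int) : Decidable (Spec_parse_option_ids value out) := by unfold Spec_parse_option_ids; infer_instance

-- ===== CLAIM (what is proved, stated in full; the proofs are below) =====
def Claim_equal_parse_option_ids : Prop := ∀ (value : Option (List Int)), Dom_parse_option_ids value → Pre_parse_option_ids value → Spec_parse_option_ids value (parse_option_ids value)

-- ===== LEMMAS AND PROOFS =====

-- a duplicate-free list has no equal adjacent pair, so B's scan finds nothing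
lemma no_adjacent_dup (ys : List Int) (hnd : ys.Nodup) :
    ((PySem.List.pyRange 1 (PySem.List.len ys) 1).any
        (fun i => PySem.List.pyGetD ys i 0 == PySem.List.pyGetD ys (i - 1) 0)) = false := by
  rw [List.any_eq_false]
  intro i hi
  rw [PySem.List.len_eq, PySem.List.mem_pyRange_one] at hi
  obtain ⟨h1, h2⟩ := hi
  rw [Bool.not_eq_true, beq_eq_false_iff_ne]
  rw [PySem.List.pyGetD_eq_getElem ys (0:Int) (by omega) (by omega),
      PySem.List.pyGetD_eq_getElem ys (0:Int) (by omega) (by omega)]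
  intro heq
  have := (List.Nodup.getElem_inj_iff hnd).mp heq
  omega

theorem parse_option_ids_spec : Claim_equal_parse_option_ids := by
  intro value _ hpre
  unfold Spec_parse_option_ids parse_option_ids parse_option_ids_alt
  match value with
  | none => rfl
  | some xs =>
    obtain ⟨hnd, -⟩ := hpre
    simp only [Option.getD_some] at hnd
    have hmap : xs.map (fun item => item) = xs := List.map_id' xs
    have hfold : xs.foldl (fun acc item => acc ++ [item]) [] = xs := by
      simpa using PySem.List.foldl_append_singleton xs []
    simp only [hmap, hfold]
    rw [if_neg, if_neg]
    · rw [no_adjacent_dup _ ((PySem.List.sorted_perm xs (fun x => x) false).nodup_iff.mpr hnd)]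
      simp
    · rw [PySem.Set.ofList_eq_self_of_nodup xs hnd]
      simp [PySem.Set.len]
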